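-- pv_equiv track=rewrite | github.com/goncalo-leal/cyclic_redundancy_check | divide.py | clean_poly
-- ===== SOURCE A (Python) =====
-- def clean_poly(poly):
--     found_last_1 = False
--     result = []
--
--     for bit in poly[::-1]:
--         if found_last_1 or bit == 1:
--             found_last_1 = True
--             result.insert(0, bit)
--
--     return result
-- ===== SOURCE B (Python) =====
-- def clean_poly(poly):
--     result = []
--     pending = []
--     for bit in poly:
--         if bit == 1:
--             result.extend(pending)
--             pending = []
--             result.append(bit)
--         else:
--             pending.append(bit)
--     return result
-- ===== Notes on version B (the rewrite author's own statement) =====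
-- stated objective: alternative
-- what changed: Single forward pass with a result list and a pending buffer (flushed on each 1, discarded at the end) instead of A's backward iteration with a found-last-1 flag and repeated insert(0, ...).
import Mathlib
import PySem

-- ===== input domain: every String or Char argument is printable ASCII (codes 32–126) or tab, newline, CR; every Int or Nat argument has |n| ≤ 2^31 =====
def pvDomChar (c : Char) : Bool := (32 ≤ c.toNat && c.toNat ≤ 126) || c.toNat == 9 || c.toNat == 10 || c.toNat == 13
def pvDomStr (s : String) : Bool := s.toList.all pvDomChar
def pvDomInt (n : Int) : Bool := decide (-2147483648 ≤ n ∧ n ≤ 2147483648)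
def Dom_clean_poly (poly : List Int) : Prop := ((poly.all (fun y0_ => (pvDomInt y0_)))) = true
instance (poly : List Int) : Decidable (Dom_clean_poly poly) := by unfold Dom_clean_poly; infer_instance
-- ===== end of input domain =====

-- B replaces A's backward scan with insert(0, ...) by a single forward pass
-- keeping a result list and a pending buffer flushed on each 1 (objective: alternative).


-- ===== PORT A =====
-- for bit in poly[::-1]: if found_last_1 or bit == 1: found_last_1 = True; result.insert(0, bit)
def clean_poly (poly : List Int) : List Int :=
  (((PySem.List.slice? poly none none (-1)).getD []).foldl
    (fun (s : Bool × List Int) bit =>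
      if s.1 || bit == 1 then (true, bit :: s.2) else s)
    (false, [])).2

-- ===== PORT B =====
-- forward pass: on bit == 1 flush pending into result and append the bit; else buffer it
-- the loop body: flush pending and append on a 1, otherwise buffer the bit
def stepB (s : List Int × List Int) (bit : Int) : List Int × List Int :=
  if bit == 1 then (s.1 ++ s.2 ++ [bit], []) else (s.1, s.2 ++ [bit])

def clean_poly_alt (poly : List Int) : List Int :=
  (poly.foldl stepB ([], [])).1

-- ===== PRECONDITION & SPEC =====
def Spec_clean_poly (poly : List Int) (out : List Int) : Prop := out = clean_poly_alt poly
instance (poly : List Int) (out : List Int) : Decidable (Spec_clean_poly poly out) := by unfold Spec_clean_poly; infer_instance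

-- ===== CLAIM (what is proved, stated in full; the proofs are below) =====
def Claim_equal_clean_poly : Prop := ∀ (poly : List Int), Dom_clean_poly poly → Spec_clean_poly poly (clean_poly poly)

-- ===== LEMMAS AND PROOFS =====

-- common characterisation: keep x iff x = 1 or a 1 occurs later
def hKeep : List Int → List Int
  | [] => []
  | x :: xs => if x = 1 ∨ (1 : Int) ∈ xs then x :: hKeep xs else []

theorem hKeep_eq_nil {xs : List Int} (h : (1 : Int) ∉ xs) : hKeep xs = [] := by
  cases xs with
  | nil => rfl
  | cons x xs =>
    simp only [List.mem_cons, not_or] at h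
    have hx : ¬ (x = 1 ∨ (1 : Int) ∈ xs) := by
      rintro (rfl | hm)
      · exact h.1 rfl
      · exact h.2 hm
    simp [hKeep, hx]

theorem foldlA_eq (xs : List Int) :
    xs.reverse.foldl
      (fun (s : Bool × List Int) bit =>
        if s.1 || bit == 1 then (true, bit :: s.2) else s)
      (false, []) = (decide ((1 : Int) ∈ xs), hKeep xs) := by
  induction xs with
  | nil => rfl
  | cons x xs ih =>
    simp only [List.reverse_cons, List.foldl_append, ih, List.foldl_cons, List.foldl_nil]
    by_cases h : x = 1 ∨ (1 : Int) ∈ xs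
    · have hm : (1 : Int) ∈ x :: xs := by
        rcases h with h | h
        · exact h ▸ List.mem_cons_self
        · exact List.mem_cons_of_mem _ h
      rcases h with h | h <;> simp [hKeep, h, hm]
    · rw [not_or] at h
      have hx1 : ¬ (1 : Int) = x := fun e => h.1 e.symm
      have hm : (1 : Int) ∉ x :: xs := by
        simp only [List.mem_cons, not_or]
        exact ⟨hx1, h.2⟩
      simp [hKeep, h.1, h.2, hm, hKeep_eq_nil h.2, hx1]

theorem foldlB_eq (xs : List Int) : ∀ (r p : List Int),
    (xs.foldl stepB (r, p)).1 = if (1 : Int) ∈ xs then r ++ p ++ hKeep xs else r := by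
  induction xs with
  | nil => simp
  | cons x xs ih =>
    intro r p
    rw [List.foldl_cons]
    by_cases hx : x = 1
    · subst hx
      rw [show stepB (r, p) 1 = (r ++ p ++ [1], []) from by simp [stepB], ih]
      by_cases hm : (1 : Int) ∈ xs
      · simp [hKeep, hm]
      · simp [hKeep, hm, hKeep_eq_nil hm]
    · rw [show stepB (r, p) x = (r, p ++ [x]) from by simp [stepB, hx], ih]
      by_cases hm : (1 : Int) ∈ xs
      · have hmc : (1 : Int) ∈ x :: xs := List.mem_cons_of_mem _ hm
        simp [hKeep, hm, hmc]
      · have hx1 : ¬ (1 : Int) = x := fun e => hx e.symm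
        have hmc : (1 : Int) ∉ x :: xs := by
          simp only [List.mem_cons, not_or]
          exact ⟨hx1, hm⟩
        simp [hm, hmc]

theorem cleanA_eq (poly : List Int) : clean_poly poly = hKeep poly := by
  unfold clean_poly
  rw [PySem.List.slice?_none_none_neg_one, Option.getD_some, foldlA_eq]

theorem cleanB_eq (poly : List Int) : clean_poly_alt poly = hKeep poly := by
  unfold clean_poly_alt
  rw [foldlB_eq]
  by_cases hm : (1 : Int) ∈ poly
  · simp [hm]
  · simp [hm, hKeep_eq_nil hm]

-- ===== VERDICT (by name: the statement is the Claim_ definition above) =====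
theorem clean_poly_spec : Claim_equal_clean_poly := by
  intro poly _
  unfold Spec_clean_poly
  rw [cleanA_eq, cleanB_eq]
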